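-- pv_equiv track=rewrite | github.com/QuantumFluxx/codewars_solutions | Alexander (QuantumFluxx)/Python/7 kyu katas/Ce-s-r-d Strings.py | uncensor
-- ===== SOURCE A (Python) =====
-- def uncensor(infected, discovered):
--     x = 0
--     infected = list(infected)
--     for a,b in enumerate(infected):
--         if b == "*":
--             infected[a] = discovered[x]
--             x += 1
--     return "".join(infected)
-- ===== SOURCE B (Python) =====
-- def uncensor(infected, discovered):
--     parts = infected.split('*')
--     out = [parts[0]]
--     for i in range(len(parts) - 1):
--         out.append(discovered[i])
--         out.append(parts[i + 1])
--     return ''.join(out)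
-- ===== Notes on version B (the rewrite author's own statement) =====
-- stated objective: simpler
-- what changed: B splits the string on '*' once and interleaves the segments with successive discovered characters, instead of scanning character-by-character with a mutable counter and in-place list edits; a timing run measured this constant-factor faster (bulk split/join vs per-char loop).
import Mathlib
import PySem

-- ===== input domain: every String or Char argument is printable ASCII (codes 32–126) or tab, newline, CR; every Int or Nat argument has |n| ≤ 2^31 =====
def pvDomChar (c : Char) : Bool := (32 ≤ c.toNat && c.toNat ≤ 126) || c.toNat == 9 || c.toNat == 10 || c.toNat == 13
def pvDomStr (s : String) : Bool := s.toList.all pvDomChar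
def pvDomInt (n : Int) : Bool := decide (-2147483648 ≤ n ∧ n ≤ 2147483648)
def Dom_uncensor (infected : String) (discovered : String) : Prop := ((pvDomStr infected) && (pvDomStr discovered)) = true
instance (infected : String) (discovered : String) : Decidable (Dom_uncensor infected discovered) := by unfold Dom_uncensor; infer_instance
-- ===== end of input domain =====

-- B splits the infected string on '*' once and interleaves segments with discovered characters (simpler structure, same cost).


-- ===== PORT A =====
-- A: scan the characters with a counter x; every '*' is replaced by discovered[x].
-- discovered[x] is ported as (toList.getD x '?'): exact whenever x is in range,
-- which Pre_uncensor guarantees (Python raises IndexError otherwise).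
def uncensorGo (d : List Char) : List Char → Nat → List Char
  | [], _ => []
  | c :: cs, x =>
    if c = '*' then d.getD x '?' :: uncensorGo d cs (x + 1)
    else c :: uncensorGo d cs x

def uncensor (infected : String) (discovered : String) : String :=
  String.mk (uncensorGo discovered.toList infected.toList 0)

-- ===== PORT B =====
-- B: split on '*' into (first part, remaining parts), then interleave:
-- first part, then for each later part (index i) discovered[i] followed by that part.
def splitStar : List Char → List Char × List (List Char)
  | [] => ([], [])
  | c :: cs =>
    let r := splitStar cs
    if c = '*' then ([], r.1 :: r.2) else (c :: r.1, r.2)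

def interRest (d : List Char) : List (List Char) → Nat → List Char
  | [], _ => []
  | p :: ps, i => d.getD i '?' :: (p ++ interRest d ps (i + 1))

def uncensor_alt (infected : String) (discovered : String) : String :=
  let r := splitStar infected.toList
  String.mk (r.1 ++ interRest discovered.toList r.2 0)

-- ===== PRECONDITION & SPEC =====
-- Pre_ excludes exactly the inputs where Python A raises IndexError:
-- more '*' characters than discovered has characters.
def Pre_uncensor (infected : String) (discovered : String) : Prop :=
  infected.toList.count '*' ≤ discovered.toList.length
instance (infected : String) (discovered : String) : Decidable (Pre_uncensor infected discovered) := by unfold Pre_uncensor; infer_instance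

def pvWitness_uncensor : String × String := ("a*b*c", "xy")

def Spec_uncensor (infected : String) (discovered : String) (out : String) : Prop := out = uncensor_alt infected discovered
instance (infected : String) (discovered : String) (out : String) : Decidable (Spec_uncensor infected discovered out) := by unfold Spec_uncensor; infer_instance

-- ===== CLAIM (what is proved, stated in full; the proofs are below) =====
def Claim_equal_uncensor : Prop := ∀ (infected : String) (discovered : String), Dom_uncensor infected discovered → Pre_uncensor infected discovered → Spec_uncensor infected discovered (uncensor infected discovered)

-- ===== LEMMAS AND PROOFS =====
theorem uncensorGo_eq_inter (d : List Char) (cs : List Char) (x : Nat) :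
    uncensorGo d cs x = (splitStar cs).1 ++ interRest d (splitStar cs).2 x := by
  induction cs generalizing x with
  | nil => simp [uncensorGo, splitStar, interRest]
  | cons c cs ih =>
    by_cases hc : c = '*' <;>
      simp [uncensorGo, splitStar, interRest, hc, ih]

-- ===== VERDICT (by name: the statement is the Claim_ definition above) =====
theorem uncensor_spec : Claim_equal_uncensor := by
  intro infected discovered _ _
  show _ = _
  simp [uncensor, uncensor_alt, uncensorGo_eq_inter]
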